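-- pv_equiv track=rewrite | github.com/ram677/gfg_pod | subset_xor.py | subsetXOR
-- ===== SOURCE A (Python) =====
-- def subsetXOR(n: int):
--     # 1. Calculate the XOR sum of all numbers from 1 to n
--     rem = n % 4
--     if rem == 0:
--         X = n
--     elif rem == 1:
--         X = 1
--     elif rem == 2:
--         X = n + 1
--     else: # rem == 3
--         X = 0
--
--     # 2. Calculate the value 'R' that needs to be removed
--     # We need (X ^ R) = n, therefore R = X ^ n
--     R = X ^ n
--
--     # 3. Build the subset
--     # We include all numbers from 1 to n, skipping only R (if R > 0)
--     res = []
--     for i in range(1, n + 1):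
--         if i == R:
--             continue
--         res.append(i)
--
--     return res
-- ===== SOURCE B (Python) =====
-- def subsetXOR(n: int):
--     # Compute XOR(1..n) by straightforward accumulation instead of the mod-4 closed form.
--     total = 0
--     for i in range(1, n + 1):
--         total ^= i
--     R = total ^ n
--     res = []
--     for i in range(1, n + 1):
--         if i != R:
--             res.append(i)
--     return res
-- ===== Notes on version B (the rewrite author's own statement) =====
-- stated objective: alternative
-- what changed: B computes XOR(1..n) by an explicit accumulation loop (total ^= i) instead of A's mod-4 closed-form case analysis, then filters the range by R = total ^ n.
import Mathlib
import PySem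

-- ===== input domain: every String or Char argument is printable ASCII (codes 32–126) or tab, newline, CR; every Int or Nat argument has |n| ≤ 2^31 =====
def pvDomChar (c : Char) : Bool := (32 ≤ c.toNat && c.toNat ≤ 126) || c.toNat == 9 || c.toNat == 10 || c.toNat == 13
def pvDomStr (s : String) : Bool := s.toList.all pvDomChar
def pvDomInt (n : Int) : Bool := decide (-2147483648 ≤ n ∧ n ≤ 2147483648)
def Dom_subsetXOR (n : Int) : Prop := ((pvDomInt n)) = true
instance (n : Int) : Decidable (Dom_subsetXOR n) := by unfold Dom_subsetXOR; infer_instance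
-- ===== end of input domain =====

-- B replaces A's mod-4 closed form for XOR(1..n) by a plain accumulation loop (alternative, not faster).

-- ===== PORT A =====
def subsetXOR (n : Int) : List Int :=
  let rem := PySem.Int.mod n 4
  let X := if rem = 0 then n else if rem = 1 then 1 else if rem = 2 then n + 1 else 0
  let R := PySem.Int.bxor X n
  (PySem.List.pyRange 1 (n + 1) 1).foldl
    (fun res i => if i = R then res else res ++ [i]) []

-- ===== PORT B =====
def subsetXOR_alt (n : Int) : List Int :=
  let total := (PySem.List.pyRange 1 (n + 1) 1).foldl (fun t i => PySem.Int.bxor t i) 0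
  let R := PySem.Int.bxor total n
  (PySem.List.pyRange 1 (n + 1) 1).foldl
    (fun res i => if i ≠ R then res ++ [i] else res) []

-- ===== PRECONDITION & SPEC =====
def Spec_subsetXOR (n : Int) (out : List Int) : Prop := out = subsetXOR_alt n
instance (n : Int) (out : List Int) : Decidable (Spec_subsetXOR n out) := by unfold Spec_subsetXOR; infer_instance

-- ===== CLAIM (what is proved, stated in full; the proofs are below) =====
def Claim_equal_subsetXOR : Prop := ∀ (n : Int), Dom_subsetXOR n → Spec_subsetXOR n (subsetXOR n)

-- ===== LEMMAS AND PROOFS =====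

-- The iterative XOR of 1..m (as the Int fold B performs) equals the XOR of 0..m in Nat.
theorem fold_bxor_pyRange (m : Nat) :
    (PySem.List.pyRange 1 ((m : Int) + 1) 1).foldl (fun t i => PySem.Int.bxor t i) 0 =
      (((List.range (m + 1)).foldl (· ^^^ ·) 0 : Nat) : Int) := by
  induction m with
  | zero => simp [PySem.List.pyRange_one_eq_nil]
  | succ m ih =>
    rw [show ((m + 1 : Nat) : Int) + 1 = ((m : Int) + 1) + 1 by push_cast; ring,
        PySem.List.pyRange_one_succ_right (by omega), List.foldl_append, ih,
        List.range_succ, List.foldl_append]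
    simp only [List.foldl_cons, List.foldl_nil]
    rw [show ((m : Int) + 1) = ((m + 1 : Nat) : Int) by push_cast; ring,
        PySem.Int.bxor_natCast]
    rw [show m + 1 + 1 = (m+1) + 1 from rfl, List.range_succ, List.foldl_append]
    simp
    rw [List.range_succ]
    simp

-- A's mod-4 closed form equals the same Nat XOR (Mathlib's `Nat.xor_range`).
theorem closed_form_eq (m : Nat) :
    (if PySem.Int.mod (m : Int) 4 = 0 then (m : Int)
     else if PySem.Int.mod (m : Int) 4 = 1 then 1
     else if PySem.Int.mod (m : Int) 4 = 2 then (m : Int) + 1 else 0) =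
      (((List.range (m + 1)).foldl (· ^^^ ·) 0 : Nat) : Int) := by
  rw [Nat.xor_range]
  have hm : PySem.Int.mod (m : Int) 4 = ((m % 4 : Nat) : Int) := by
    exact_mod_cast PySem.Int.mod_natCast m 4
  have h4 : m % 4 = 0 ∨ m % 4 = 1 ∨ m % 4 = 2 ∨ m % 4 = 3 := by omega
  have hfin : (Fin.ofNat 4 m).val = m % 4 := Fin.val_ofNat ..
  rcases h4 with h | h | h | h <;>
    · rw [hm, h]
      have : Fin.ofNat 4 m = ⟨m % 4, by omega⟩ := Fin.ext (by rw [hfin])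
      rw [this]
      simp [h]

-- ===== VERDICT (by name: the statement is the Claim_ definition above) =====
theorem subsetXOR_spec : Claim_equal_subsetXOR := by
  intro n _
  unfold Spec_subsetXOR subsetXOR subsetXOR_alt
  dsimp only
  by_cases hn : n < 0
  · rw [PySem.List.pyRange_one_eq_nil (by omega)]
    simp
  · obtain ⟨m, rfl⟩ := Int.eq_ofNat_of_zero_le (by omega : (0:Int) ≤ n)
    rw [fold_bxor_pyRange, ← closed_form_eq]
    congr 1
    funext res i
    by_cases h : i = PySem.Int.bxor
        (if PySem.Int.mod (m : Int) 4 = 0 then (m : Int)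
         else if PySem.Int.mod (m : Int) 4 = 1 then 1
         else if PySem.Int.mod (m : Int) 4 = 2 then (m : Int) + 1 else 0) (m : Int) <;>
      simp [h]
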